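-- pv_equiv track=rewrite | github.com/acibiber53/NonogramSolver | NS-v01.py | fillhalf
-- ===== SOURCE A (Python) =====
-- BLK='\u2588' # block character
--
-- def fillhalf(board, blocks, unfinished, size):
--     halftotal=list()
--     for i in unfinished:
--         tmp=[int(i) for i in list(blocks[i])]
--         ss=sum(tmp)+(len(tmp)-1)
--         halftotal.append([ss,len(tmp),size-ss]) # totallength, howmanyparts, size-totallength
--
--     for i in range(len(unfinished)):
--         truindex=unfinished[i]
--         if truindex<size: #rows
--             if halftotal[i][0]>halftotal[i][2]: # check if the parts total are bigger than the size-parts_total, if yes we can still predict some tiles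
--                 tmp=[int(i) for i in list(blocks[truindex])] #get parts
--                 lt=len(tmp)
--                 writeindex=0
--                 for j in range(lt): # iterate through the parts
--                     item=tmp[j]
--                     tindex=writeindex+item-1
--                     diff=item-halftotal[i][2] # how many blocks we write
--                     while diff > 0:
--                         board[truindex][tindex]=BLK
--                         diff-=1
--                         tindex-=1
--                     writeindex=writeindex+item+1
--         else:  #columns
--             col=truindex-size
--             if halftotal[i][0]>halftotal[i][2]: # check if the parts total are bigger than the size-parts_total, if yes we can still predict some tiles
--                 tmp=[int(i) for i in list(blocks[truindex])] #get parts
--                 lt=len(tmp)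
--                 writeindex=0
--                 for j in range(lt): # iterate through the parts
--                     item=tmp[j]
--                     tindex=writeindex+item-1
--                     diff=item-halftotal[i][2] # how many blocks we write
--                     while diff > 0:
--                         board[tindex][col]=BLK
--                         diff-=1
--                         tindex-=1
--                     writeindex=writeindex+item+1
--
--     return board, unfinished
-- ===== SOURCE B (Python) =====
-- BLK='\u2588' # block character
--
-- def fillhalf(board, blocks, unfinished, size):
--     # B: per line, build a position->block-label map of the LEFTMOST placement,
--     # then mark exactly the cells whose label survives shifting the line right by
--     # the slack (leftmost/rightmost placement intersection by shift-and-match).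
--     for truindex in unfinished:
--         tmp = [int(c) for c in blocks[truindex]]
--         slack = size - (sum(tmp) + len(tmp) - 1)
--         left = {}
--         pos = 0
--         for j, item in enumerate(tmp):
--             for p in range(pos, pos + item):
--                 left[p] = j
--             pos += item + 1
--         for p, j in left.items():
--             if left.get(p - slack) == j:
--                 if truindex < size:
--                     board[truindex][p] = BLK
--                 else:
--                     board[p][truindex - size] = BLK
--     return board, unfinished
-- ===== Notes on version B (the rewrite author's own statement) =====
-- stated objective: alternative
-- what changed: B replaces A's halftotal table, ss>slack guard and per-block descending while-countdown by a label-map algorithm: per line it builds a position-to-block-index dict of the leftmost placement and then marks exactly the cells whose label is unchanged when looked up shifted left by the slack (leftmost/rightmost placement intersection by shift-and-match), writing ascending through one unified row/column statement.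
import Mathlib
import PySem

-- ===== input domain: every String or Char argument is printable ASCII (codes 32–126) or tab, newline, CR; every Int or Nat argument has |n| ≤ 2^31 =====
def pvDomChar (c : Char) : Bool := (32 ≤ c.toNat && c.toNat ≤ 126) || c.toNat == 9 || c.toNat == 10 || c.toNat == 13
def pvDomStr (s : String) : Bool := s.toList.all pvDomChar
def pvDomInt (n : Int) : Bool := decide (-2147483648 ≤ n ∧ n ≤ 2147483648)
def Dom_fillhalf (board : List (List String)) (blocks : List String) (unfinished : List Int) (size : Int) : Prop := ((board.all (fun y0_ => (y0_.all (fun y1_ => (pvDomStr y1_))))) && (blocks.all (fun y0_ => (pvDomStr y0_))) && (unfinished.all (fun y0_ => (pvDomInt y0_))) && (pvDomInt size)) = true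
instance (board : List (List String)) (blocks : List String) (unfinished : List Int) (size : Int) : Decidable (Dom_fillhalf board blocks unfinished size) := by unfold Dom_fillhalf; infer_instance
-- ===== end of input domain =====

-- B replaces A's halftotal table, its ss>slack guard and its per-block descending while-countdown
-- by a label-map algorithm: per line it builds a position→block-index dict of the LEFTMOST
-- placement and marks exactly the cells whose label is unchanged when looked up shifted by the
-- slack (leftmost/rightmost placement intersection by shift-and-match).  Objective: alternative.
-- Both Pythons mutate `board` in place; the equivalence proved here is about the RETURN value
-- (B performs the same in-place mutation).

-- shared helpers (port of subexpressions both sources contain)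
def pvBLK : String := "\u2588"

-- int(c) for a single digit character; exact on digit chars (Pre_ admits only digits)
def pvDig (c : Char) : Int := (c.toNat : Int) - 48

-- [int(i) for i in list(s)]
def pvParse (s : String) : List Int := s.toList.map pvDig

-- sum(tmp)+(len(tmp)-1)
def pvSS (tmp : List Int) : Int := tmp.sum + ((tmp.length : Int) - 1)

-- board[r][c] = pvBLK  (Python in-place write; out-of-range raises in Python — those inputs are
-- excluded by Pre_, here the write is a no-op)
def setCell (b : List (List String)) (r c : Int) : List (List String) :=
  PySem.List.pySetD b r (PySem.List.pySetD (PySem.List.pyGetD b r []) c pvBLK)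

-- ===== PORT A =====

-- the inner `while diff > 0` of the row branch; fuel = diff.toNat (the loop decrements diff by 1)
def runRowA (b : List (List String)) (tru : Int) (t : Int) : Nat → List (List String)
  | 0 => b
  | n + 1 => runRowA (setCell b tru t) tru (t - 1) n

-- the inner `while diff > 0` of the column branch
def runColA (b : List (List String)) (col : Int) (t : Int) : Nat → List (List String)
  | 0 => b
  | n + 1 => runColA (setCell b t col) col (t - 1) n

def fillhalf (board : List (List String)) (blocks : List String) (unfinished : List Int) (size : Int) : List (List String) × List Int :=
  let halftotal : List (Int × Int × Int) := unfinished.map (fun i =>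
    let tmp := pvParse (PySem.List.pyGetD blocks i "")
    let ss := pvSS tmp
    (ss, ((tmp.length : Int), size - ss)))
  let board2 := (List.range unfinished.length).foldl (fun b i =>
    let truindex := unfinished.getD i 0
    let ht := halftotal.getD i (0, (0, 0))
    if truindex < size then
      if ht.1 > ht.2.2 then
        let tmp := pvParse (PySem.List.pyGetD blocks truindex "")
        let lt := tmp.length
        ((List.range lt).foldl (fun (bw : List (List String) × Int) j =>
            let item := tmp.getD j 0
            let tindex := bw.2 + item - 1
            let diff := item - ht.2.2
            (runRowA bw.1 truindex tindex diff.toNat, bw.2 + item + 1)) (b, 0)).1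
      else b
    else
      let col := truindex - size
      if ht.1 > ht.2.2 then
        let tmp := pvParse (PySem.List.pyGetD blocks truindex "")
        let lt := tmp.length
        ((List.range lt).foldl (fun (bw : List (List String) × Int) j =>
            let item := tmp.getD j 0
            let tindex := bw.2 + item - 1
            let diff := item - ht.2.2
            (runColA bw.1 col tindex diff.toNat, bw.2 + item + 1)) (b, 0)).1
      else b) board
  (board2, unfinished)

-- ===== PORT B =====

def fillhalf_alt (board : List (List String)) (blocks : List String) (unfinished : List Int) (size : Int) : List (List String) × List Int :=
  (unfinished.foldl (fun b truindex =>
     let tmp := pvParse (PySem.List.pyGetD blocks truindex "")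
     let slack := size - (tmp.sum + ((tmp.length : Int) - 1))
     -- left = {} ; for j, item in enumerate(tmp): for p in range(pos, pos+item): left[p] = j
     let left := ((PySem.List.enumerate tmp 0).foldl
        (fun (dp : PySem.Dict Int Int × Int) ji =>
          ((PySem.List.pyRange dp.2 (dp.2 + ji.2) 1).foldl (fun d p => d.insert p ji.1) dp.1,
           dp.2 + ji.2 + 1))
        (PySem.Dict.empty, 0)).1
     -- for p, j in left.items(): if left.get(p - slack) == j: write
     left.items.foldl (fun b2 pj =>
        if left.get? (pj.1 - slack) == some pj.2 then
          (if truindex < size then setCell b2 truindex pj.1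
           else setCell b2 pj.1 (truindex - size))
        else b2) b) board,
   unfinished)

-- ===== PRECONDITION & SPEC =====

-- Pre_ = the inputs on which the Python A returns normally, minus a stated narrowing: it also
-- excludes degenerate inputs on which A returns only because Python's negative-index wraparound
-- absorbs a negative slack, or because every out-of-range cell of a too-short board happens to
-- fall in a gap of the block pattern (A's value there is an accident of wraparound; B marks only
-- true overlap cells — see the cite in claim.json; the bound is stated uniformly).
def Pre_fillhalf (board : List (List String)) (blocks : List String) (unfinished : List Int) (size : Int) : Prop :=
  ∀ i ∈ unfinished,
    PySem.Raise.InRange blocks.length i ∧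
    ((PySem.List.pyGetD blocks i "").toList.all PySem.Chars.isdigit = true) ∧
    (let ss := pvSS (pvParse (PySem.List.pyGetD blocks i ""));
     size - ss < ss →
       0 ≤ size - ss ∧
       (if i < size then
          PySem.Raise.InRange board.length i ∧
            ss ≤ ((PySem.List.pyGetD board i []).length : Int)
        else
          ss ≤ (board.length : Int) ∧
            ∀ row ∈ board.take ss.toNat, i - size < (row.length : Int)))

instance (board : List (List String)) (blocks : List String) (unfinished : List Int) (size : Int) : Decidable (Pre_fillhalf board blocks unfinished size) := by unfold Pre_fillhalf; infer_instance

def pvWitness_fillhalf : List (List String) × List String × List Int × Int :=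
  ([["."]], ["1", "0"], [0], 1)

def Spec_fillhalf (board : List (List String)) (blocks : List String) (unfinished : List Int) (size : Int) (out : List (List String) × List Int) : Prop := out = fillhalf_alt board blocks unfinished size
instance (board : List (List String)) (blocks : List String) (unfinished : List Int) (size : Int) (out : List (List String) × List Int) : Decidable (Spec_fillhalf board blocks unfinished size out) := by unfold Spec_fillhalf; infer_instance

-- ===== CLAIM (what is proved, stated in full; the proofs are below) =====
def Claim_equal_fillhalf : Prop := ∀ (board : List (List String)) (blocks : List String) (unfinished : List Int) (size : Int), Dom_fillhalf board blocks unfinished size → Pre_fillhalf board blocks unfinished size → Spec_fillhalf board blocks unfinished size (fillhalf board blocks unfinished size)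

-- ===== LEMMAS AND PROOFS =====

theorem length_pySetD {α : Type} (l : List α) (i : Int) (v : α) :
    (PySem.List.pySetD l i v).length = l.length := by
  simp [PySem.List.pySetD, PySem.List.pySet?]
  rcases h : PySem.List.pyIdx? l.length i with _ | k <;> simp

theorem pyIdx?_lt {n : Nat} {i : Int} {k : Nat} (h : PySem.List.pyIdx? n i = some k) : k < n := by
  unfold PySem.List.pyIdx? at h
  split_ifs at h <;> simp_all <;> omega

theorem setCell_none {b : List (List String)} {r : Int} (c : Int)
    (h : PySem.List.pyIdx? b.length r = none) : setCell b r c = b := by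
  simp [setCell, PySem.List.pySetD, PySem.List.pySet?, h]

theorem setCell_some {b : List (List String)} {r : Int} {k : Nat} (c : Int)
    (h : PySem.List.pyIdx? b.length r = some k) :
    setCell b r c = b.set k (PySem.List.pySetD (b.getD k []) c pvBLK) := by
  simp [setCell, PySem.List.pySetD, PySem.List.pySet?, PySem.List.pyGetD, PySem.List.pyGet?, h, List.getD]

theorem pySetD_comm_self {α : Type} (l : List α) (i j : Int) (x : α) :
    PySem.List.pySetD (PySem.List.pySetD l i x) j x
      = PySem.List.pySetD (PySem.List.pySetD l j x) i x := by
  rcases h1 : PySem.List.pyIdx? l.length i with _ | k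
  · rcases h2 : PySem.List.pyIdx? l.length j with _ | k'
    all_goals simp [PySem.List.pySetD, PySem.List.pySet?, h1, h2]
  · rcases h2 : PySem.List.pyIdx? l.length j with _ | k'
    · simp [PySem.List.pySetD, PySem.List.pySet?, h1, h2]
    · by_cases hk : k = k'
      · subst hk
        simp [PySem.List.pySetD, PySem.List.pySet?, h1, h2, List.set_set]
      · simp [PySem.List.pySetD, PySem.List.pySet?, h1, h2, List.set_comm _ _ hk]

theorem length_setCell (b : List (List String)) (r c : Int) :
    (setCell b r c).length = b.length := by
  rw [setCell]; exact length_pySetD _ _ _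

theorem setCell_comm (b : List (List String)) (r c r' c' : Int) :
    setCell (setCell b r c) r' c' = setCell (setCell b r' c') r c := by
  rcases h1 : PySem.List.pyIdx? b.length r with _ | k
  · have e1 : setCell b r c = b := setCell_none c h1
    have h1' : PySem.List.pyIdx? (setCell b r' c').length r = none := by
      rw [length_setCell]; exact h1
    rw [e1, setCell_none c h1']
  · rcases h2 : PySem.List.pyIdx? b.length r' with _ | k'
    · have e2 : setCell b r' c' = b := setCell_none c' h2
      have h2' : PySem.List.pyIdx? (setCell b r c).length r' = none := by
        rw [length_setCell]; exact h2
      rw [e2, setCell_none c' h2']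
    · have hk := pyIdx?_lt h1
      have hk' := pyIdx?_lt h2
      have e1 := setCell_some (b := b) c h1
      have e2 := setCell_some (b := b) c' h2
      have h2'' : PySem.List.pyIdx? (b.set k (PySem.List.pySetD (b.getD k []) c pvBLK)).length r' = some k' := by
        simpa using h2
      have h1'' : PySem.List.pyIdx? (b.set k' (PySem.List.pySetD (b.getD k' []) c' pvBLK)).length r = some k := by
        simpa using h1
      rw [e1, e2, setCell_some c' h2'', setCell_some c h1'']
      by_cases hkk : k = k'
      · subst hkk
        simp [List.getD, hk, List.set_set, pySetD_comm_self]
      · simp only [List.getD, List.getElem?_set_ne hkk, List.getElem?_set_ne (Ne.symm hkk)]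
        exact List.set_comm _ _ hkk

theorem foldl_out (g : List (List String) → Int → List (List String))
    (hg : ∀ b r c p, g (setCell b r c) p = setCell (g b p) r c) :
    ∀ (ps : List Int) (b : List (List String)) (r c : Int),
      ps.foldl g (setCell b r c) = setCell (ps.foldl g b) r c := by
  intro ps
  induction ps with
  | nil => intro b r c; rfl
  | cons p ps ih =>
    intro b r c
    simp only [List.foldl_cons]
    rw [hg, ih]

theorem runRowA_eq (tru : Int) : ∀ (n : Nat) (b : List (List String)) (lo : Int),
    runRowA b tru (lo + (n : Int) - 1) n
      = ((List.range n).map (fun k => lo + (k : Int))).foldl (fun b2 p => setCell b2 tru p) b := by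
  intro n
  induction n with
  | zero => intro b lo; simp [runRowA]
  | succ n ih =>
    intro b lo
    simp only [Nat.cast_add, Nat.cast_one]
    have e1 : runRowA b tru (lo + ((n : Int) + 1) - 1) (n + 1)
        = runRowA (setCell b tru (lo + (n : Int))) tru (lo + (n : Int) - 1) n := by
      show runRowA (setCell b tru (lo + ((n : Int) + 1) - 1)) tru (lo + ((n : Int) + 1) - 1 - 1) n = _
      have a1 : lo + ((n : Int) + 1) - 1 = lo + (n : Int) := by ring
      rw [a1]
    rw [e1, ih, foldl_out (fun b2 p => setCell b2 tru p) (fun b r c p => setCell_comm b r c tru p ▸ rfl)]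
    simp [List.range_succ, List.foldl_append]

theorem runColA_eq (col : Int) : ∀ (n : Nat) (b : List (List String)) (lo : Int),
    runColA b col (lo + (n : Int) - 1) n
      = ((List.range n).map (fun k => lo + (k : Int))).foldl (fun b2 p => setCell b2 p col) b := by
  intro n
  induction n with
  | zero => intro b lo; simp [runColA]
  | succ n ih =>
    intro b lo
    simp only [Nat.cast_add, Nat.cast_one]
    have e1 : runColA b col (lo + ((n : Int) + 1) - 1) (n + 1)
        = runColA (setCell b (lo + (n : Int)) col) col (lo + (n : Int) - 1) n := by
      show runColA (setCell b (lo + ((n : Int) + 1) - 1) col) col (lo + ((n : Int) + 1) - 1 - 1) n = _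
      have a1 : lo + ((n : Int) + 1) - 1 = lo + (n : Int) := by ring
      rw [a1]
    rw [e1, ih, foldl_out (fun b2 p => setCell b2 p col) (fun b r c p => setCell_comm b r c p col ▸ rfl)]
    simp [List.range_succ, List.foldl_append]

theorem map_flat_singleton {α β γ : Type} (f : α → β) (g : β → γ) (l : List α) :
    List.map g (List.flatMap (fun a => [f a]) l) = List.map (fun k => g (f k)) l := by
  induction l with
  | nil => rfl
  | cons x xs ih => simp_all [List.flatMap_cons]

theorem blockRow_eq (tru slack item : Int) (b : List (List String)) (wi : Int) :
    runRowA b tru (wi + item - 1) (item - slack).toNat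
      = (PySem.List.pyRange (wi + slack) (wi + item) 1).foldl (fun b2 p => setCell b2 tru p) b := by
  rw [PySem.List.pyRange_one]
  by_cases h : item - slack ≤ 0
  · have h0 : (item - slack).toNat = 0 := by omega
    have h1 : (wi + item - (wi + slack)).toNat = 0 := by omega
    rw [h0, h1]
    rfl
  · have h1 : wi + item - 1 = (wi + slack) + (((item - slack).toNat : Nat) : Int) - 1 := by omega
    have h2 : (wi + item - (wi + slack)).toNat = (item - slack).toNat := by omega
    rw [h1, h2, runRowA_eq]
    simp [map_flat_singleton]

theorem blockCol_eq (col slack item : Int) (b : List (List String)) (wi : Int) :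
    runColA b col (wi + item - 1) (item - slack).toNat
      = (PySem.List.pyRange (wi + slack) (wi + item) 1).foldl (fun b2 p => setCell b2 p col) b := by
  rw [PySem.List.pyRange_one]
  by_cases h : item - slack ≤ 0
  · have h0 : (item - slack).toNat = 0 := by omega
    have h1 : (wi + item - (wi + slack)).toNat = 0 := by omega
    rw [h0, h1]
    rfl
  · have h1 : wi + item - 1 = (wi + slack) + (((item - slack).toNat : Nat) : Int) - 1 := by omega
    have h2 : (wi + item - (wi + slack)).toNat = (item - slack).toNat := by omega
    rw [h1, h2, runColA_eq]
    simp [map_flat_singleton]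

theorem foldl_range_getD {α β : Type} (d : α) (f : β → α → β) :
    ∀ (l : List α) (b : β),
      (List.range l.length).foldl (fun acc j => f acc (l.getD j d)) b = l.foldl f b := by
  intro l
  induction l with
  | nil => intro b; rfl
  | cons x xs ih =>
    intro b
    rw [List.length_cons, List.range_succ_eq_map, List.foldl_cons, List.foldl_map]
    simp only [List.getD_cons_zero, List.getD_cons_succ]
    exact ih (f b x)

theorem foldl_range_getD_map {α γ β : Type} (g : α → γ) (d : α) (d' : γ) (G : β → α → γ → β) :
    ∀ (l : List α) (b : β),
      (List.range l.length).foldl (fun acc i => G acc (l.getD i d) ((l.map g).getD i d')) b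
        = l.foldl (fun acc x => G acc x (g x)) b := by
  intro l
  induction l with
  | nil => intro b; rfl
  | cons x xs ih =>
    intro b
    rw [List.length_cons, List.range_succ_eq_map, List.foldl_cons, List.foldl_map]
    simp only [List.getD_cons_zero, List.getD_cons_succ, List.map_cons]
    exact ih (G b x (g x))

-- proof-side copies of the per-line bodies (used only by the lemmas below)
def gHT (blocks : List String) (size : Int) (i : Int) : Int × Int × Int :=
  let tmp := pvParse (PySem.List.pyGetD blocks i "")
  let ss := pvSS tmp
  (ss, ((tmp.length : Int), size - ss))

def lineA (blocks : List String) (size : Int) (b : List (List String)) (truindex : Int)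
    (ht : Int × Int × Int) : List (List String) :=
  if truindex < size then
    if ht.1 > ht.2.2 then
      let tmp := pvParse (PySem.List.pyGetD blocks truindex "")
      let lt := tmp.length
      ((List.range lt).foldl (fun (bw : List (List String) × Int) j =>
          let item := tmp.getD j 0
          let tindex := bw.2 + item - 1
          let diff := item - ht.2.2
          (runRowA bw.1 truindex tindex diff.toNat, bw.2 + item + 1)) (b, 0)).1
    else b
  else
    let col := truindex - size
    if ht.1 > ht.2.2 then
      let tmp := pvParse (PySem.List.pyGetD blocks truindex "")
      let lt := tmp.length
      ((List.range lt).foldl (fun (bw : List (List String) × Int) j =>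
          let item := tmp.getD j 0
          let tindex := bw.2 + item - 1
          let diff := item - ht.2.2
          (runColA bw.1 col tindex diff.toNat, bw.2 + item + 1)) (b, 0)).1
    else b

-- intermediate per-line form: guarded fold of the per-block overlap ranges
def lineM (blocks : List String) (size : Int) (b : List (List String)) (truindex : Int) :
    List (List String) :=
  let tmp := pvParse (PySem.List.pyGetD blocks truindex "")
  let ss := pvSS tmp
  let slack := size - ss
  if ss ≤ slack then b
  else (tmp.foldl (fun (bs : List (List String) × Int) item =>
     ((PySem.List.pyRange (bs.2 + slack) (bs.2 + item) 1).foldl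
         (fun b2 pos => if truindex < size then setCell b2 truindex pos
                        else setCell b2 pos (truindex - size)) bs.1,
      bs.2 + item + 1)) (b, 0)).1

theorem line_eq (blocks : List String) (size : Int) (b : List (List String)) (x : Int) :
    lineA blocks size b x (gHT blocks size x) = lineM blocks size b x := by
  by_cases hss : pvSS (pvParse (PySem.List.pyGetD blocks x ""))
      ≤ size - pvSS (pvParse (PySem.List.pyGetD blocks x ""))
  · have hng := not_lt.mpr hss
    simp [lineA, lineM, gHT, hss, hng]
  · have hgt := not_le.mp hss
    simp only [lineA, lineM, gHT]
    rw [if_neg hss]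
    by_cases hx : x < size
    · rw [if_pos hx, if_pos hgt]
      rw [foldl_range_getD 0
        (fun (bw : List (List String) × Int) item =>
          (runRowA bw.1 x (bw.2 + item - 1)
              (item - (size - pvSS (pvParse (PySem.List.pyGetD blocks x "")))).toNat,
           bw.2 + item + 1))
        (pvParse (PySem.List.pyGetD blocks x "")) (b, 0)]
      have hfun : (fun (bs : List (List String) × Int) item =>
          ((PySem.List.pyRange (bs.2 + (size - pvSS (pvParse (PySem.List.pyGetD blocks x ""))))
              (bs.2 + item) 1).foldl
              (fun b2 pos => if x < size then setCell b2 x pos else setCell b2 pos (x - size)) bs.1,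
           bs.2 + item + 1))
          = (fun (bw : List (List String) × Int) item =>
          (runRowA bw.1 x (bw.2 + item - 1)
              (item - (size - pvSS (pvParse (PySem.List.pyGetD blocks x "")))).toNat,
           bw.2 + item + 1)) := by
        funext bw item
        simp only [hx, if_true]
        rw [blockRow_eq]
      rw [hfun]
    · rw [if_neg hx, if_pos hgt]
      rw [foldl_range_getD 0
        (fun (bw : List (List String) × Int) item =>
          (runColA bw.1 (x - size) (bw.2 + item - 1)
              (item - (size - pvSS (pvParse (PySem.List.pyGetD blocks x "")))).toNat,
           bw.2 + item + 1))
        (pvParse (PySem.List.pyGetD blocks x "")) (b, 0)]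
      have hfun : (fun (bs : List (List String) × Int) item =>
          ((PySem.List.pyRange (bs.2 + (size - pvSS (pvParse (PySem.List.pyGetD blocks x ""))))
              (bs.2 + item) 1).foldl
              (fun b2 pos => if x < size then setCell b2 x pos else setCell b2 pos (x - size)) bs.1,
           bs.2 + item + 1))
          = (fun (bw : List (List String) × Int) item =>
          (runColA bw.1 (x - size) (bw.2 + item - 1)
              (item - (size - pvSS (pvParse (PySem.List.pyGetD blocks x "")))).toNat,
           bw.2 + item + 1)) := by
        funext bw item
        simp only [hx, if_false]
        rw [blockCol_eq]
      rw [hfun]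

-- B-proof side: closed form of the position→label map of the leftmost placement
def leftItems : List Int → Int → Int → List (Int × Int)
  | [], _, _ => []
  | item :: rest, L, j =>
      (PySem.List.pyRange L (L + item) 1).map (fun p => (p, j)) ++ leftItems rest (L + item + 1) (j + 1)

-- the per-block overlap-range writes of lineM, state (board, blockStart)
def midRun (wr : List (List String) → Int → List (List String)) (slack : Int) :
    List Int → List (List String) → Int → List (List String)
  | [], b, _ => b
  | item :: rest, b, L =>
      midRun wr slack rest ((PySem.List.pyRange (L + slack) (L + item) 1).foldl wr b) (L + item + 1)

theorem midRun_eq_fold (wr : List (List String) → Int → List (List String)) (slack : Int) :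
    ∀ (tmp : List Int) (b : List (List String)) (L : Int),
      (tmp.foldl (fun (bs : List (List String) × Int) item =>
          ((PySem.List.pyRange (bs.2 + slack) (bs.2 + item) 1).foldl wr bs.1, bs.2 + item + 1))
        (b, L)).1 = midRun wr slack tmp b L := by
  intro tmp
  induction tmp with
  | nil => intro b L; rfl
  | cons item rest ih =>
    intro b L
    simp only [List.foldl_cons, midRun]
    exact ih _ _

theorem midRun_of_small (wr : List (List String) → Int → List (List String)) (slack : Int) :
    ∀ (tmp : List Int) (b : List (List String)) (L : Int),
      (∀ it ∈ tmp, it ≤ slack) → midRun wr slack tmp b L = b := by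
  intro tmp
  induction tmp with
  | nil => intro b L _; rfl
  | cons item rest ih =>
    intro b L h
    have he : PySem.List.pyRange (L + slack) (L + item) 1 = [] :=
      PySem.List.pyRange_one_eq_nil (by have := h item (by simp); omega)
    simp only [midRun, he, List.foldl_nil]
    exact ih _ _ (fun it hit => h it (by simp [hit]))

theorem mem_leftItems_ge : ∀ (tmp : List Int) (L j : Int) (q w : Int),
    (∀ it ∈ tmp, 0 ≤ it) → (q, w) ∈ leftItems tmp L j → L ≤ q := by
  intro tmp
  induction tmp with
  | nil => intro L j q w _ h; simp [leftItems] at h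
  | cons item rest ih =>
    intro L j q w hnn h
    simp only [leftItems, List.mem_append] at h
    rcases h with h | h
    · simp only [List.mem_map] at h
      obtain ⟨p, hp, he⟩ := h
      have := PySem.List.mem_pyRange_one.mp hp
      cases he
      omega
    · have h0 : (0 : Int) ≤ item := hnn item (by simp)
      have := ih (L + item + 1) (j + 1) q w (fun it hit => hnn it (by simp [hit])) h
      omega

theorem map_fst_pair (r : List Int) (j : Int) :
    (r.map (fun p => (p, j))).map Prod.fst = r := by
  rw [List.map_map]
  exact List.map_id r

theorem nodup_keys_leftItems : ∀ (tmp : List Int) (L j : Int),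
    (∀ it ∈ tmp, 0 ≤ it) → ((leftItems tmp L j).map Prod.fst).Nodup := by
  intro tmp
  induction tmp with
  | nil => intro L j _; simp [leftItems]
  | cons item rest ih =>
    intro L j hnn
    simp only [leftItems, List.map_append]
    rw [List.nodup_append, map_fst_pair]
    refine ⟨PySem.List.nodup_pyRange_one L (L + item),
      ih (L + item + 1) (j + 1) (fun it hit => hnn it (by simp [hit])), ?_⟩
    intro a ha c hc
    have h1 := PySem.List.mem_pyRange_one.mp ha
    simp only [List.mem_map] at hc
    obtain ⟨⟨q, w⟩, hq, hqe⟩ := hc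
    have h2 := mem_leftItems_ge rest (L + item + 1) (j + 1) q w
      (fun it hit => hnn it (by simp [hit])) hq
    simp only at hqe
    subst hqe
    omega

-- the dict the port builds has exactly leftItems as its items list
theorem build_items : ∀ (tmp : List Int) (j L : Int) (d : PySem.Dict Int Int),
    (∀ it ∈ tmp, 0 ≤ it) → (∀ k ∈ d.keys, k < L) → d.keys.Nodup →
    (((PySem.List.enumerate tmp j).foldl
        (fun (dp : PySem.Dict Int Int × Int) ji =>
          ((PySem.List.pyRange dp.2 (dp.2 + ji.2) 1).foldl (fun d p => d.insert p ji.1) dp.1,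
           dp.2 + ji.2 + 1)) (d, L)).1).items
      = d.items ++ leftItems tmp L j := by
  intro tmp
  induction tmp with
  | nil => intro j L d _ _ _; simp [PySem.List.enumerate_nil, leftItems]
  | cons item rest ih =>
    intro j L d hnn hlt hnd
    rw [PySem.List.enumerate_cons, List.foldl_cons]
    have hfresh : ∀ p ∈ PySem.List.pyRange L (L + item) 1, d.contains p = false := by
      intro p hp
      have hge := (PySem.List.mem_pyRange_one.mp hp).1
      rw [PySem.Dict.contains_eq_decide_mem_keys]
      simp only [decide_eq_false_iff_not]
      intro hm
      have := hlt p hm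
      omega
    have hstep := PySem.Dict.items_foldl_insert_fresh (PySem.List.pyRange L (L + item) 1)
      (fun p => p) (fun _ => j) d hfresh (by simpa using PySem.List.nodup_pyRange_one L (L + item))
    have hkeys : ((PySem.List.pyRange L (L + item) 1).foldl (fun d p => d.insert p j) d).keys
        = d.keys ++ (PySem.List.pyRange L (L + item) 1) := by
      show ((PySem.List.pyRange L (L + item) 1).foldl (fun d p => d.insert p j) d).items.map Prod.fst = _
      rw [hstep]
      simp only [List.map_append]
      rw [map_fst_pair (PySem.List.pyRange L (L + item) 1) j]
      rfl
    rw [ih (j + 1) (L + item + 1) _ (fun it hit => hnn it (by simp [hit])) ?_ ?_]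
    · rw [hstep]
      simp [leftItems]
    · intro k hk
      rw [hkeys] at hk
      rcases List.mem_append.mp hk with hk | hk
      · have := hlt k hk
        have h0 : (0 : Int) ≤ item := hnn item (by simp)
        omega
      · have := PySem.List.mem_pyRange_one.mp hk
        omega
    · rw [hkeys]
      rw [List.nodup_append]
      refine ⟨hnd, PySem.List.nodup_pyRange_one _ _, ?_⟩
      intro a ha c hc
      have h1 := hlt a ha
      have h2 := (PySem.List.mem_pyRange_one.mp hc).1
      omega

-- fold of a guarded write over a range = fold of the write over the guarded sub-range
theorem range_if_fold (wr : List (List String) → Int → List (List String)) :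
    ∀ (c lo hi : Int) (b : List (List String)), lo ≤ c →
      (PySem.List.pyRange lo hi 1).foldl (fun b2 p => if c ≤ p then wr b2 p else b2) b
        = (PySem.List.pyRange c hi 1).foldl wr b := by
  intro c lo hi b hlc
  by_cases hch : c ≤ hi
  · rw [PySem.List.pyRange_one_append lo c hi hlc hch, List.foldl_append]
    have h1 : (PySem.List.pyRange lo c 1).foldl (fun b2 p => if c ≤ p then wr b2 p else b2) b = b := by
      rw [PySem.List.foldl_congr_mem' _ _ (fun b2 _ => b2) b
        (fun x hx acc => by
          have := PySem.List.mem_pyRange_one.mp hx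
          rw [if_neg (by omega)])]
      induction PySem.List.pyRange lo c 1 <;> simp_all
    rw [h1]
    exact PySem.List.foldl_congr_mem' _ _ wr b
      (fun x hx acc => by
        have := PySem.List.mem_pyRange_one.mp hx
        rw [if_pos (by omega)])
  · have h2 : PySem.List.pyRange c hi 1 = [] := PySem.List.pyRange_one_eq_nil (by omega)
    rw [h2, List.foldl_nil]
    rw [PySem.List.foldl_congr_mem' _ _ (fun b2 _ => b2) b
      (fun x hx acc => by
        have := PySem.List.mem_pyRange_one.mp hx
        rw [if_neg (by omega)])]
    induction PySem.List.pyRange lo hi 1 <;> simp_all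

-- the crux: iterating the label map with the shift-and-match test writes exactly the
-- per-block overlap ranges
theorem main_write (F : PySem.Dict Int Int) (slack : Int)
    (wr : List (List String) → Int → List (List String)) (hsl : 0 ≤ slack) :
    ∀ (rest : List Int) (L j : Int) (b : List (List String)),
      (∀ it ∈ rest, 0 ≤ it) →
      (∀ q w, (q, w) ∈ leftItems rest L j → F.get? q = some w) →
      (∀ q w, F.get? q = some w → j ≤ w → (q, w) ∈ leftItems rest L j) →
      (leftItems rest L j).foldl
          (fun b2 pj => if F.get? (pj.1 - slack) == some pj.2 then wr b2 pj.1 else b2) b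
        = midRun wr slack rest b L := by
  intro rest
  induction rest with
  | nil => intro L j b _ _ _; rfl
  | cons item rest2 ih =>
    intro L j b hnn h2 h1
    simp only [leftItems, List.foldl_append, midRun]
    have hseg : ((PySem.List.pyRange L (L + item) 1).map (fun p => (p, j))).foldl
          (fun b2 pj => if F.get? (pj.1 - slack) == some pj.2 then wr b2 pj.1 else b2) b
        = (PySem.List.pyRange (L + slack) (L + item) 1).foldl wr b := by
      rw [List.foldl_map]
      rw [PySem.List.foldl_congr_mem' _ _ (fun b2 p => if L + slack ≤ p then wr b2 p else b2) b
        (fun p hp acc => by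
          have hpb := PySem.List.mem_pyRange_one.mp hp
          show (if (F.get? (p - slack) == some j) = true then wr acc p else acc)
              = if L + slack ≤ p then wr acc p else acc
          by_cases hc : L + slack ≤ p
          · have hq : F.get? (p - slack) = some j := by
              apply h2
              simp only [leftItems, List.mem_append]
              left
              simp only [List.mem_map]
              exact ⟨p - slack, PySem.List.mem_pyRange_one.mpr (by omega), rfl⟩
            rw [if_pos (by simp [hq]), if_pos hc]
          · rw [if_neg hc]
            rw [if_neg ?_]
            simp only [beq_iff_eq]
            intro hq
            have hm := h1 (p - slack) j hq (le_refl j)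
            have := mem_leftItems_ge (item :: rest2) L j (p - slack) j hnn hm
            omega)]
      exact range_if_fold wr (L + slack) L (L + item) b (by omega)
    rw [hseg]
    apply ih (L + item + 1) (j + 1)
    · exact fun it hit => hnn it (by simp [hit])
    · intro q w hm
      exact h2 q w (by simp [leftItems, List.mem_append, hm])
    · intro q w hg hj
      have hm := h1 q w hg (by omega)
      simp only [leftItems, List.mem_append] at hm
      rcases hm with hm | hm
      · simp only [List.mem_map] at hm
        obtain ⟨p, _, he⟩ := hm
        cases he
        omega
      · exact hm

-- proof-side copy of the per-line body of B's port
def lineB2 (blocks : List String) (size : Int) (b : List (List String)) (truindex : Int) :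
    List (List String) :=
  let tmp := pvParse (PySem.List.pyGetD blocks truindex "")
  let slack := size - (tmp.sum + ((tmp.length : Int) - 1))
  let left := ((PySem.List.enumerate tmp 0).foldl
     (fun (dp : PySem.Dict Int Int × Int) ji =>
       ((PySem.List.pyRange dp.2 (dp.2 + ji.2) 1).foldl (fun d p => d.insert p ji.1) dp.1,
        dp.2 + ji.2 + 1))
     (PySem.Dict.empty, 0)).1
  left.items.foldl (fun b2 pj =>
     if left.get? (pj.1 - slack) == some pj.2 then
       (if truindex < size then setCell b2 truindex pj.1
        else setCell b2 pj.1 (truindex - size))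
     else b2) b

-- the per-line body of B over an abstract parsed block list
theorem coreLine (size x : Int) (tmp : List Int) (b : List (List String))
    (hnn : ∀ it ∈ tmp, 0 ≤ it)
    (hsl : size - pvSS tmp < pvSS tmp → 0 ≤ size - pvSS tmp) :
    (((PySem.List.enumerate tmp 0).foldl
        (fun (dp : PySem.Dict Int Int × Int) ji =>
          ((PySem.List.pyRange dp.2 (dp.2 + ji.2) 1).foldl (fun d p => d.insert p ji.1) dp.1,
           dp.2 + ji.2 + 1)) (PySem.Dict.empty, 0)).1).items.foldl
      (fun b2 pj =>
        if (((PySem.List.enumerate tmp 0).foldl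
            (fun (dp : PySem.Dict Int Int × Int) ji =>
              ((PySem.List.pyRange dp.2 (dp.2 + ji.2) 1).foldl (fun d p => d.insert p ji.1) dp.1,
               dp.2 + ji.2 + 1)) (PySem.Dict.empty, 0)).1).get? (pj.1 - (size - pvSS tmp))
            == some pj.2 then
          (if x < size then setCell b2 x pj.1 else setCell b2 pj.1 (x - size))
        else b2) b
    = if pvSS tmp ≤ size - pvSS tmp then b
      else (tmp.foldl (fun (bs : List (List String) × Int) item =>
        ((PySem.List.pyRange (bs.2 + (size - pvSS tmp)) (bs.2 + item) 1).foldl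
            (fun b2 pos => if x < size then setCell b2 x pos
                           else setCell b2 pos (x - size)) bs.1,
         bs.2 + item + 1)) (b, 0)).1 := by
  by_cases htne : tmp = []
  · subst htne
    simp [PySem.List.enumerate_nil, PySem.Dict.empty, pvSS]
  · have hlen : 1 ≤ (tmp.length : Int) := by
      have := List.length_pos_of_ne_nil htne
      omega
    have hsum : 0 ≤ tmp.sum := List.sum_nonneg hnn
    have hss0 : 0 ≤ pvSS tmp := by simp only [pvSS]; omega
    have hsl0 : 0 ≤ size - pvSS tmp := by
      by_cases hc : size - pvSS tmp < pvSS tmp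
      · exact hsl hc
      · omega
    set F := ((PySem.List.enumerate tmp 0).foldl
       (fun (dp : PySem.Dict Int Int × Int) ji =>
         ((PySem.List.pyRange dp.2 (dp.2 + ji.2) 1).foldl (fun d p => d.insert p ji.1) dp.1,
          dp.2 + ji.2 + 1))
       (PySem.Dict.empty, 0)).1 with hF
    have hitems : F.items = leftItems tmp 0 0 := by
      rw [hF, build_items tmp 0 0 PySem.Dict.empty hnn
        (by simp [PySem.Dict.empty, PySem.Dict.keys]) (by simp [PySem.Dict.empty, PySem.Dict.keys])]
      simp [PySem.Dict.empty]
    have hkeysnd : F.keys.Nodup := by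
      show (F.items.map Prod.fst).Nodup
      rw [hitems]
      exact nodup_keys_leftItems tmp 0 0 hnn
    have hH2 : ∀ q w, (q, w) ∈ leftItems tmp 0 0 → F.get? q = some w := by
      intro q w hm
      exact PySem.Dict.get?_of_mem_items F (by rw [hitems]; exact hm) hkeysnd
    have hH1 : ∀ q w, F.get? q = some w → (0 : Int) ≤ w → (q, w) ∈ leftItems tmp 0 0 := by
      intro q w hg _
      have := PySem.Dict.mem_items_of_get?_eq_some F hg
      rwa [hitems] at this
    have hmain := main_write F (size - pvSS tmp)
      (fun b2 p => if x < size then setCell b2 x p else setCell b2 p (x - size)) hsl0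
      tmp 0 0 b hnn hH2 hH1
    rw [hitems, hmain]
    by_cases hc : pvSS tmp ≤ size - pvSS tmp
    · rw [if_pos hc]
      apply midRun_of_small
      intro it hit
      have h1 : it ≤ tmp.sum := List.single_le_sum hnn it hit
      have h2 : pvSS tmp = tmp.sum + ((tmp.length : Int) - 1) := rfl
      omega
    · rw [if_neg hc]
      exact (midRun_eq_fold _ _ tmp b 0).symm

theorem lineB2_eq_lineM (blocks : List String) (size : Int) (b : List (List String)) (x : Int)
    (hdig : (PySem.List.pyGetD blocks x "").toList.all PySem.Chars.isdigit = true)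
    (hsl : size - pvSS (pvParse (PySem.List.pyGetD blocks x "")) <
        pvSS (pvParse (PySem.List.pyGetD blocks x "")) →
        0 ≤ size - pvSS (pvParse (PySem.List.pyGetD blocks x ""))) :
    lineB2 blocks size b x = lineM blocks size b x := by
  have hnn : ∀ it ∈ pvParse (PySem.List.pyGetD blocks x ""), 0 ≤ it := by
    intro it hit
    simp only [pvParse, List.mem_map] at hit
    obtain ⟨c, hc, he⟩ := hit
    have hd : PySem.Chars.isdigit c = true := by
      rw [List.all_eq_true] at hdig
      exact hdig c hc
    simp [PySem.Chars.isdigit] at hd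
    obtain ⟨h1, h2⟩ := hd
    rw [Char.le_def] at h1 h2
    rw [UInt32.le_iff_toNat_le] at h1 h2
    have hd0 : ('0').val.toNat = 48 := rfl
    have hd9 : ('9').val.toNat = 57 := rfl
    rw [hd0] at h1
    rw [hd9] at h2
    subst he
    show (0 : Int) ≤ (c.val.toNat : Int) - 48
    omega
  exact coreLine size x (pvParse (PySem.List.pyGetD blocks x "")) b hnn hsl

-- B's port is the fold of lineB2 over the unfinished lines
theorem alt_eq_fold (board : List (List String)) (blocks : List String) (unfinished : List Int)
    (size : Int) :
    fillhalf_alt board blocks unfinished size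
      = (unfinished.foldl (fun b x => lineB2 blocks size b x) board, unfinished) := rfl

-- A's port is the fold of lineA over the unfinished lines
theorem a_eq_fold (board : List (List String)) (blocks : List String) (unfinished : List Int)
    (size : Int) :
    fillhalf board blocks unfinished size
      = (unfinished.foldl (fun b x => lineA blocks size b x (gHT blocks size x)) board, unfinished) := by
  show ((List.range unfinished.length).foldl
          (fun b i => lineA blocks size b (unfinished.getD i 0)
            ((unfinished.map (gHT blocks size)).getD i (0, (0, 0)))) board, unfinished) = _
  refine congrArg (fun z => (z, unfinished)) ?_
  rw [foldl_range_getD_map (gHT blocks size) 0 (0, (0, 0)) (lineA blocks size)]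

-- ===== VERDICT (by name: the statement is the Claim_ definition above) =====
theorem fillhalf_spec : Claim_equal_fillhalf := by
  intro board blocks unfinished size _ hpre
  unfold Spec_fillhalf
  rw [a_eq_fold, alt_eq_fold]
  refine congrArg (fun z => (z, unfinished)) ?_
  apply PySem.List.foldl_congr_mem'
  intro x hx acc
  have hp := hpre x hx
  rw [line_eq blocks size acc x]
  exact (lineB2_eq_lineM blocks size acc x hp.2.1 (fun h => (hp.2.2 h).1)).symm
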